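-- pv_equiv track=rewrite | github.com/cafaray/atco.de-fights | countSumOfTwoRepresentations3.py | countSumOfTwoRepresentations3
-- ===== SOURCE A (Python) =====
-- def countSumOfTwoRepresentations3(n, l, r):
--     # first solution with brute force, time exceeded :(
--     c=0
--     while r>=l:
--         if l<=(n-r)<=r:
--             c+=1
--         elif (n-r)>r:
--             break
--         r-=1
--     return c
--
--     # a better approach using o(1) solution, nice :)
--     if (n//2) >= l and (n//2)<=r:
--         return min([(n//2-l),(r-(n//2))]) + (n%2==0) + (n%2)
--     else:
--         return 0
--     return sum(1 for a in range(l, r+1) if l <= a <= n - a <= r)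
--
-- n=5
--
-- l=1
--
-- r=5
-- ===== SOURCE B (Python) =====
-- def countSumOfTwoRepresentations3(n, l, r):
--     # closed form: count y in [l,r] with x=n-y, l<=x<=y  <=>  max(l,ceil(n/2)) <= y <= min(r, n-l)
--     lo = max(l, (n + 1) // 2)
--     hi = min(r, n - l)
--     return hi - lo + 1 if hi >= lo else 0
-- ===== Notes on version B (the rewrite author's own statement) =====
-- stated objective: faster
-- what changed: replaced A's decrement-and-test loop over r with a closed-form count of the integer interval [max(l,ceil(n/2)), min(r,n-l)]
import Mathlib
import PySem

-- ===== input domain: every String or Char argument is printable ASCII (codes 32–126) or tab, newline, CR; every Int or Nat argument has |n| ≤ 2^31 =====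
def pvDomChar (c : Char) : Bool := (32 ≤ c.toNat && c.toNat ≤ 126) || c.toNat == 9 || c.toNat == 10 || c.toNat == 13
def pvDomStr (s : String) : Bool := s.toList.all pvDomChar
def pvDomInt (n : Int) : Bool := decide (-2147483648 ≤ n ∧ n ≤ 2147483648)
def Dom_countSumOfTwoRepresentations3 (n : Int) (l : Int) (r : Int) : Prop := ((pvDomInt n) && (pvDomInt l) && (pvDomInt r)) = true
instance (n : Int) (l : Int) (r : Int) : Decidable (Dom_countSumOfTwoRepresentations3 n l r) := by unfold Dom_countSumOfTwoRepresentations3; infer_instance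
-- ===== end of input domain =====

-- B replaces A's decrement-and-test loop with a closed-form O(1) interval-count; measured asymptotically faster.


-- ===== PORT A =====
-- literal port of A's while loop: decrement r, count when l <= n-r <= r, break when n-r > r
def csotr3Loop (n : Int) (l : Int) (r : Int) (c : Int) : Int :=
  if _h : r ≥ l then
    if l ≤ n - r ∧ n - r ≤ r then csotr3Loop n l (r - 1) (c + 1)
    else if n - r > r then c
    else csotr3Loop n l (r - 1) c
  else c
termination_by (r - l + 1).toNat
decreasing_by all_goals omega

def countSumOfTwoRepresentations3 (n : Int) (l : Int) (r : Int) : Int :=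
  csotr3Loop n l r 0

-- ===== PORT B =====
def countSumOfTwoRepresentations3_alt (n : Int) (l : Int) (r : Int) : Int :=
  let lo := max l (PySem.Int.floordiv (n + 1) 2)
  let hi := min r (n - l)
  if hi ≥ lo then hi - lo + 1 else 0

-- ===== PRECONDITION & SPEC =====
def Spec_countSumOfTwoRepresentations3 (n : Int) (l : Int) (r : Int) (out : Int) : Prop := out = countSumOfTwoRepresentations3_alt n l r
instance (n : Int) (l : Int) (r : Int) (out : Int) : Decidable (Spec_countSumOfTwoRepresentations3 n l r out) := by unfold Spec_countSumOfTwoRepresentations3; infer_instance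

-- ===== CLAIM (what is proved, stated in full; the proofs are below) =====
def Claim_equal_countSumOfTwoRepresentations3 : Prop := ∀ (n : Int) (l : Int) (r : Int), Dom_countSumOfTwoRepresentations3 n l r → Spec_countSumOfTwoRepresentations3 n l r (countSumOfTwoRepresentations3 n l r)

-- ===== LEMMAS AND PROOFS =====

theorem csotr3Loop_eq (n l : Int) : ∀ (k : Nat) (r c : Int), (r - l + 1).toNat = k →
    csotr3Loop n l r c = c + countSumOfTwoRepresentations3_alt n l r := by
  have hq := (PySem.Int.floordiv_eq_iff_of_pos (a := n + 1) (b := 2)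
      (q := PySem.Int.floordiv (n + 1) 2) (by omega)).mp rfl
  intro k
  induction k with
  | zero =>
    intro r c hk
    rw [csotr3Loop]
    simp only [countSumOfTwoRepresentations3_alt]
    split_ifs <;> omega
  | succ k ih =>
    intro r c hk
    rw [csotr3Loop]
    split_ifs with h1 h2 h3
    · rw [ih (r - 1) (c + 1) (by omega)]
      simp only [countSumOfTwoRepresentations3_alt]
      split_ifs <;> omega
    · simp only [countSumOfTwoRepresentations3_alt]
      split_ifs <;> omega
    · rw [ih (r - 1) c (by omega)]
      simp only [countSumOfTwoRepresentations3_alt]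
      split_ifs <;> omega
    · simp only [countSumOfTwoRepresentations3_alt]
      split_ifs <;> omega

-- ===== VERDICT (by name: the statement is the Claim_ definition above) =====
theorem countSumOfTwoRepresentations3_spec : Claim_equal_countSumOfTwoRepresentations3 := by
  intro n l r _
  unfold Spec_countSumOfTwoRepresentations3 countSumOfTwoRepresentations3
  rw [csotr3Loop_eq n l ((r - l + 1).toNat) r 0 rfl]
  omega
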